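-- pv_equiv track=rewrite | github.com/bkfox/pepr | pepr/utils/string.py | camel_to_verbose
-- ===== SOURCE A (Python) =====
-- def camel_to_verbose(value):
--     """
--     Return verbose version of a camel cased string.
--     """
--     i_ = 0
--     r = ''
--     for i, c in enumerate(value):
--         if not c.isupper():
--             continue
--         r += value[i_:i] + ' ' + c \
--                 if i else c
--         i_ = i+1
--
--     r += value[i_:]
--     return r
-- ===== SOURCE B (Python) =====
-- def camel_to_verbose(value):
--     """
--     Return verbose version of a camel cased string.
--     """
--     words = []
--     current = ''
--     for c in value:
--         if c.isupper() and current: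
--             words.append(current)
--             current = c
--         else:
--             current += c
--     words.append(current)
--     return ' '.join(words)
-- ===== Notes on version B (the rewrite author's own statement) =====
-- stated objective: simpler
-- what changed: B splits the string into a list of words (starting a new word before each uppercase char, except when nothing is accumulated yet) and space-joins them, replacing A's inline splicing of slices driven by a remembered last-uppercase index.
import Mathlib
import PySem

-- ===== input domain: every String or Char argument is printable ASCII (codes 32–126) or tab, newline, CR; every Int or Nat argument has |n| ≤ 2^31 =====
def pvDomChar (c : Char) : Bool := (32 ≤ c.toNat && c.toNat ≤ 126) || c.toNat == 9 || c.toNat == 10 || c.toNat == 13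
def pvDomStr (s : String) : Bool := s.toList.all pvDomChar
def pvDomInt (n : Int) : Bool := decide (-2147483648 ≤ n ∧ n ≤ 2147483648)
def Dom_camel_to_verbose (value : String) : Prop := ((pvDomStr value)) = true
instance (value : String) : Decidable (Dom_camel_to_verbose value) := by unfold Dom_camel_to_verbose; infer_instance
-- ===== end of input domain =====

-- B builds a list of words (splitting before each uppercase) and joins them with spaces,
-- instead of A's inline splicing of slices and spaces driven by a remembered index; objective: simpler.

-- ===== PORT A =====
-- the for-loop over enumerate(value), state (i_, r)
def pvALoop (cs : List Char) : List (Int × Char) → Int → List Char → Int × List Char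
  | [], i_, r => (i_, r)
  | (i, c) :: rest, i_, r =>
    if PySem.Chars.isupper c then
      pvALoop cs rest (i + 1)
        (if i ≠ 0 then r ++ PySem.List.slice cs (some i_) (some i) ++ [' '] ++ [c]
         else r ++ [c])
    else pvALoop cs rest i_ r

def camel_to_verbose (value : String) : String :=
  let cs := value.toList
  let p := pvALoop cs (PySem.List.enumerate cs 0) 0 []
  String.mk (p.2 ++ PySem.List.slice cs (some p.1) none)

-- ===== PORT B =====
-- the for-loop over the characters, state (words, current)
def pvBLoop : List Char → List (List Char) → List Char → List (List Char) × List Char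
  | [], words, cur => (words, cur)
  | c :: rest, words, cur =>
    if PySem.Chars.isupper c && !cur.isEmpty then pvBLoop rest (words ++ [cur]) [c]
    else pvBLoop rest words (cur ++ [c])

def camel_to_verbose_alt (value : String) : String :=
  let q := pvBLoop value.toList [] []
  String.mk (PySem.Chars.join [' '] (q.1 ++ [q.2]))

-- ===== PRECONDITION & SPEC =====
def Spec_camel_to_verbose (value : String) (out : String) : Prop := out = camel_to_verbose_alt value
instance (value : String) (out : String) : Decidable (Spec_camel_to_verbose value out) := by unfold Spec_camel_to_verbose; infer_instance

-- ===== CLAIM (what is proved, stated in full; the proofs are below) =====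
def Claim_equal_camel_to_verbose : Prop := ∀ (value : String), Dom_camel_to_verbose value → Spec_camel_to_verbose value (camel_to_verbose value)

-- ===== LEMMAS AND PROOFS =====

theorem pv_join_append_singleton (sep : List Char) (ws : List (List Char)) (w : List Char)
    (h : ws ≠ []) :
    PySem.Chars.join sep (ws ++ [w]) = PySem.Chars.join sep ws ++ sep ++ w := by
  induction ws with
  | nil => exact absurd rfl h
  | cons a t ih =>
    cases t with
    | nil => simp [PySem.Chars.join_cons_cons, PySem.Chars.join_singleton]
    | cons b t' =>
      have := ih (by simp)
      simp only [List.cons_append, PySem.Chars.join_cons_cons] at this ⊢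
      simp [this]

theorem pv_join_last_append (sep : List Char) (ws : List (List Char)) (w t : List Char) :
    PySem.Chars.join sep (ws ++ [w ++ t]) = PySem.Chars.join sep (ws ++ [w]) ++ t := by
  cases ws with
  | nil => simp [PySem.Chars.join_singleton]
  | cons a s =>
    rw [pv_join_append_singleton sep (a :: s) (w ++ t) (by simp),
        pv_join_append_singleton sep (a :: s) w (by simp)]
    simp

-- the loop invariant tying A's (i_, r) to B's (words, cur)
theorem pv_loop_eq (cs : List Char) :
    ∀ (rest : List Char) (k i_ : Nat) (r : List Char) (words : List (List Char)) (cur : List Char),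
      i_ ≤ k →
      rest = cs.drop k →
      (cur = [] → (k = 0 ∧ words = [])) →
      (k = 0 → cur = []) →
      r ++ (cs.drop i_).take (k - i_) = PySem.Chars.join [' '] (words ++ [cur]) →
      (pvALoop cs (PySem.List.enumerate rest (k : Int)) (i_ : Int) r).2
        ++ PySem.List.slice cs (some ((pvALoop cs (PySem.List.enumerate rest (k : Int)) (i_ : Int) r).1)) none
      = PySem.Chars.join [' ']
          ((pvBLoop rest words cur).1 ++ [(pvBLoop rest words cur).2]) := by
  intro rest
  induction rest with
  | nil =>
    intro k i_ r words cur h1 h2 h3 h4 h5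
    simp only [PySem.List.enumerate_nil, pvALoop, pvBLoop]
    rw [PySem.List.slice_from_natCast]
    have hlen : cs.length ≤ k := by
      have := congrArg List.length h2
      simp at this; omega
    rw [← h5, List.take_of_length_le (by simp; omega)]
  | cons c rest' ih =>
    intro k i_ r words cur h1 h2 h3 h4 h5
    have hck : cs.drop k = c :: rest' := h2.symm
    have hrest' : rest' = cs.drop (k + 1) := by
      have := congrArg List.tail hck
      simpa [List.tail_drop] using this.symm
    rw [PySem.List.enumerate_cons]
    by_cases hu : PySem.Chars.isupper c
    · -- uppercase character
      by_cases hcur : cur = []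
      · -- then k = 0, words = [], i_ = 0, r = []
        obtain ⟨hk0, hw⟩ := h3 hcur
        subst hk0 hw hcur
        have hi0 : i_ = 0 := by omega
        subst hi0
        have hr : r = [] := by
          simpa [PySem.Chars.join_singleton] using h5
        subst hr
        simp only [pvALoop, pvBLoop, hu, Nat.cast_zero, ne_eq, not_true_eq_false,
          List.nil_append, List.isEmpty_nil, Bool.not_true, Bool.and_false,
          Bool.false_eq_true, reduceIte]
        have : ((0 : Int) + 1) = ((1 : Nat) : Int) := by norm_num
        rw [this]
        apply ih 1 1 [c] [] [c] (by omega) hrest' (by simp) (by omega)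
        simp
      · -- cur ≠ [] : both sides emit a word boundary
        have hk : k ≠ 0 := fun h0 => hcur (h4 h0)
        have hknz : ((k : Int)) ≠ 0 := by exact_mod_cast hk
        have hce : cur.isEmpty = false := by simp [hcur]
        simp only [pvALoop, pvBLoop, hu, hce, hknz, ne_eq, not_false_eq_true, ite_true,
          Bool.not_false, Bool.and_self]
        have : ((k : Int) + 1) = (((k + 1 : Nat)) : Int) := by push_cast; ring
        rw [this]
        apply ih (k + 1) (k + 1) _ _ [c] (by omega) hrest' (by simp) (by omega)
        rw [PySem.List.slice_natCast]
        rw [pv_join_append_singleton [' '] (words ++ [cur]) [c] (by simp), ← h5]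
        simp
    · -- not uppercase: A skips, B extends cur
      have hb : (PySem.Chars.isupper c && !cur.isEmpty) = false := by simp [hu]
      simp only [pvALoop, pvBLoop, hu, Bool.false_eq_true, reduceIte]
      have : ((k : Int) + 1) = (((k + 1 : Nat)) : Int) := by push_cast; ring
      rw [this]
      apply ih (k + 1) i_ r words (cur ++ [c]) (by omega) hrest' (by simp) (by omega)
      rw [pv_join_last_append [' '] words cur [c], ← h5]
      have htake : (cs.drop i_).take (k + 1 - i_) = (cs.drop i_).take (k - i_) ++ [c] := by
        have h0 : (cs.drop i_)[k - i_]? = some c := by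
          rw [List.getElem?_drop]
          have : i_ + (k - i_) = k := by omega
          rw [this]
          have := congrArg (fun l => l[0]?) hck
          simpa [List.getElem?_drop] using this
        have h1' : k + 1 - i_ = (k - i_) + 1 := by omega
        rw [h1', List.take_add_one, h0]
        simp
      rw [htake]
      simp

-- ===== VERDICT (by name: the statement is the Claim_ definition above) =====
theorem camel_to_verbose_spec : Claim_equal_camel_to_verbose := by
  intro value _
  unfold Spec_camel_to_verbose camel_to_verbose camel_to_verbose_alt
  have h := pv_loop_eq value.toList value.toList 0 0 [] [] []
    (le_refl 0) (by simp) (fun _ => ⟨rfl, rfl⟩) (fun _ => rfl)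
    (by simp [PySem.Chars.join_singleton])
  simp only [Nat.cast_zero] at h
  simp [h]
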